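-- pv_equiv track=rewrite | github.com/babyturrtle/google-foobar-challenge | task-1/solution.py | solution
-- ===== SOURCE A (Python) =====
-- def solution(data, n):
--     if len(data)<100:
--         j = 1
--         newlist = []
--         for x in range(0, len(data)-1, 1):
--             for y in range(x+1, len(data), 1):
--                 if data[x] == data[y]:
--                     j=j+1
--             if j>n:
--                 newlist.append(data[x])
--             j = 1
--         newdata = [i for i in data if i not in newlist]
--         if n == 0:
--             newdata = []
--     return newdata
-- ===== SOURCE B (Python) =====
-- def solution(data, n):
--     counts = {}
--     for v in data:
--         counts[v] = counts.get(v, 0) + 1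
--     return [v for v in data if counts[v] <= n]
-- ===== Notes on version B (the rewrite author's own statement) =====
-- stated objective: faster
-- what changed: Replaces the quadratic nested position-by-position duplicate scan (plus a separate membership filter against the collected blacklist and a special n==0 branch) by one pass that builds a frequency dictionary and a single filter keeping values whose total count is at most n.
-- outside the precondition, e.g. on solution([1, 2], -1): A returns [2], B returns []
import Mathlib
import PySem

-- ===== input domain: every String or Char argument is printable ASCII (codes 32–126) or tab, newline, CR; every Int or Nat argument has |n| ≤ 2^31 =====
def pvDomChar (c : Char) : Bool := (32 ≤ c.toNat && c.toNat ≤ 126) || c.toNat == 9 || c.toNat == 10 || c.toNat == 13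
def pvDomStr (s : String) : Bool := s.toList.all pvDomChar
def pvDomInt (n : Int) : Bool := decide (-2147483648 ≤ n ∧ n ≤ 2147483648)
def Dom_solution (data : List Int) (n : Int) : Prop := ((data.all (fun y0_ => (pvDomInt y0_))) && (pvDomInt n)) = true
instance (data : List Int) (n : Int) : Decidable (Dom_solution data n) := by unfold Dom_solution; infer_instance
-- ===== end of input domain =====

-- B replaces A's quadratic nested duplicate-counting scan by one frequency-dictionary pass plus a single filter (return value only; A raises on len(data) >= 100, excluded by Pre_).


-- ===== PORT A =====
-- the inner 'for y' loop computing j for a fixed x (j starts at 1 before each inner loop)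
def pvA_j (data : List Int) (x : Int) : Int :=
  (PySem.List.pyRange (x + 1) (data.length : Int)).foldl
    (fun j y => if PySem.List.pyGetD data x 0 == PySem.List.pyGetD data y 0 then j + 1 else j) 1

-- the outer 'for x' loop building newlist
def pvA_newlist (data : List Int) (n : Int) : List Int :=
  (PySem.List.pyRange 0 ((data.length : Int) - 1)).foldl
    (fun acc x => if pvA_j data x > n then acc ++ [PySem.List.pyGetD data x 0] else acc) []

def solution (data : List Int) (n : Int) : List Int :=
  if data.length < 100 then
    let newdata := data.filter (fun i => !((pvA_newlist data n).contains i))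
    if n == 0 then [] else newdata
  else []  -- Python raises UnboundLocalError here; excluded by Pre_solution

-- ===== PORT B =====
def solution_alt (data : List Int) (n : Int) : List Int :=
  let counts := data.foldl (fun d v => d.insert v (d.getD v 0 + 1)) PySem.Dict.empty
  data.filter (fun v => counts.getD v 0 ≤ n)

-- ===== PRECONDITION & SPEC =====
-- Pre_ excludes len(data) >= 100, where A raises UnboundLocalError, and negative n, which lies
-- outside the task's natural domain ("remove values appearing more than n times", a count): no
-- behaviour is specified there and the two implementations are free to disagree (A keeps a value
-- occurring only at the last position, B removes everything).
def Pre_solution (data : List Int) (n : Int) : Prop := data.length < 100 ∧ 0 ≤ n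
instance (data : List Int) (n : Int) : Decidable (Pre_solution data n) := by unfold Pre_solution; infer_instance

def pvWitness_solution : List Int × Int := ([1, 2, 2, 3], 1)

def Spec_solution (data : List Int) (n : Int) (out : List Int) : Prop := out = solution_alt data n
instance (data : List Int) (n : Int) (out : List Int) : Decidable (Spec_solution data n out) := by unfold Spec_solution; infer_instance

-- ===== CLAIM (what is proved, stated in full; the proofs are below) =====
def Claim_equal_solution : Prop := ∀ (data : List Int) (n : Int), Dom_solution data n → Pre_solution data n → Spec_solution data n (solution data n)

-- ===== LEMMAS AND PROOFS =====

-- A's inner counting loop, started at any position k, counts the occurrences of c in data.drop k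
lemma pvA_count_range (data : List Int) (c : Int) (k : Nat) :
    List.countP (fun y => c == PySem.List.pyGetD data y 0)
      (PySem.List.pyRange (k : Int) (data.length : Int)) = (data.drop k).count c := by
  by_cases h : k < data.length
  · rw [PySem.List.pyRange_one_cons (by exact_mod_cast h)]
    rw [List.countP_cons]
    have hd : data.drop k = data[k] :: data.drop (k + 1) := by
      exact (List.drop_eq_getElem_cons h).symm ▸ rfl
    rw [hd, List.count_cons]
    have h2 : ((k : Int) + 1) = ((k + 1 : Nat) : Int) := by push_cast; ring
    rw [h2, pvA_count_range data c (k + 1)]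
    rw [PySem.List.pyGetD_eq_getElem data 0 (by positivity) (by exact_mod_cast h)]
    by_cases hc : c = data[k] <;> simp [hc, Int.toNat_natCast] <;> omega
  · have h1 : PySem.List.pyRange (k : Int) (data.length : Int) = [] :=
      PySem.List.pyRange_one_eq_nil (by omega)
    rw [h1, List.drop_eq_nil_of_le (by omega)]
    rfl
termination_by data.length - k

-- at a valid position k, A's j is the number of occurrences of data[k] from position k onwards
lemma pvA_j_eq (data : List Int) (k : Nat) (hk : k < data.length) :
    pvA_j data (k : Int) = ((data.drop k).count (data[k]) : Int) := by
  unfold pvA_j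
  rw [PySem.List.foldl_count_if]
  rw [PySem.List.pyGetD_eq_getElem data 0 (by positivity) (by exact_mod_cast hk)]
  simp only [Int.toNat_natCast]
  have h2 : ((k : Int) + 1) = ((k + 1 : Nat) : Int) := by push_cast; ring
  rw [h2, pvA_count_range data (data[k]) (k + 1)]
  have hd : data.drop k = data[k] :: data.drop (k + 1) := by
    exact (List.drop_eq_getElem_cons hk).symm ▸ rfl
  rw [hd, List.count_cons_self]
  push_cast; ring

-- for 1 ≤ n and v ∈ data: v lands in newlist exactly when its total count exceeds n
lemma pvA_newlist_mem (data : List Int) (n : Int) (hn : 1 ≤ n) (v : Int) (hv : v ∈ data) :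
    v ∈ pvA_newlist data n ↔ n < (data.count v : Int) := by
  unfold pvA_newlist
  rw [show (fun (acc : List Int) (x : Int) => if pvA_j data x > n then acc ++ [PySem.List.pyGetD data x 0] else acc)
      = (fun acc x => if (decide (pvA_j data x > n)) = true then acc ++ [PySem.List.pyGetD data x 0] else acc) from by
    funext acc x; simp]
  rw [PySem.List.foldl_append_if]
  simp only [List.nil_append, List.mem_map, List.mem_filter, PySem.List.mem_pyRange_one]
  constructor
  · rintro ⟨x, ⟨⟨hx0, hx1⟩, hj⟩, hfx⟩
    obtain ⟨k, rfl⟩ : ∃ k : Nat, x = (k : Int) := ⟨x.toNat, (Int.toNat_of_nonneg hx0).symm⟩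
    have hk : k < data.length := by omega
    rw [PySem.List.pyGetD_eq_getElem data 0 (by positivity) (by exact_mod_cast hk)] at hfx
    simp only [Int.toNat_natCast] at hfx
    rw [pvA_j_eq data k hk, hfx] at hj
    have hle : (data.drop k).count v ≤ data.count v := (List.drop_sublist k data).count_le v
    simp only [decide_eq_true_eq] at hj
    omega
  · intro h
    have hk : data.idxOf v < data.length := List.idxOf_lt_length_of_mem hv
    set k := data.idxOf v with hkdef
    have hget : data[k] = v := List.getElem_idxOf hk
    have htake : (data.take k).count v = 0 := by
      rw [List.count_eq_zero]
      intro hmem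
      have := (List.mem_take_iff_idxOf_lt hv).mp hmem
      omega
    have hcnt : (data.drop k).count v = data.count v := by
      conv_rhs => rw [← List.take_append_drop k data]
      rw [List.count_append, htake]; omega
    have hlen : (data.drop k).count v ≤ (data.drop k).length := List.count_le_length
    have hkl : k + 1 < data.length := by
      rw [List.length_drop] at hlen
      omega
    refine ⟨(k : Int), ⟨⟨by positivity, by exact_mod_cast (by omega : (k:Int) < (data.length : Int) - 1)⟩, ?_⟩, ?_⟩
    · simp only [decide_eq_true_eq]
      rw [pvA_j_eq data k hk, hget, hcnt]
      omega
    · rw [PySem.List.pyGetD_eq_getElem data 0 (by positivity) (by exact_mod_cast hk)]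
      simp only [Int.toNat_natCast]
      exact hget

-- ===== VERDICT (by name: the statement is the Claim_ definition above) =====
theorem solution_spec : Claim_equal_solution := by
  intro data n _ hpre
  obtain ⟨hlen, hn0⟩ := hpre
  unfold Spec_solution
  simp only [solution, solution_alt, if_pos hlen, PySem.Dict.getD_foldl_insert_add_one,
    PySem.Dict.getD_empty, zero_add]
  by_cases hz : n = 0
  · subst hz
    rw [if_pos (by simp)]
    symm
    rw [List.filter_eq_nil_iff]
    intro v hv
    have := List.count_pos_iff.mpr hv
    simp only [decide_eq_true_eq]
    omega
  · rw [if_neg (by simpa using hz)]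
    apply List.filter_congr
    intro v hv
    have hmem := pvA_newlist_mem data n (by omega) v hv
    by_cases hc : v ∈ pvA_newlist data n
    · have := hmem.mp hc
      simp [hc]
      omega
    · simp [hc]
      rw [hmem] at hc
      omega
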